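-- pv_equiv track=rewrite | github.com/ZahraMivehi/NamedEntityRecognition | feature.py | set_n_gramNull
-- ===== SOURCE A (Python) =====
-- def set_n_gramNull(token,level):
--     i=1
--     count=0
--     while(i<=level):
--         if len(token)<i:
--             count=count+1
--         i=i+1
--     return count
-- ===== SOURCE B (Python) =====
-- def set_n_gramNull(token, level):
--     # closed form: number of i in [1, level] with len(token) < i
--     return max(0, level - len(token))
-- ===== Notes on version B (the rewrite author's own statement) =====
-- stated objective: simpler
-- what changed: Replaced the counting while-loop with the closed form max(0, level - len(token)).
import Mathlib
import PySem

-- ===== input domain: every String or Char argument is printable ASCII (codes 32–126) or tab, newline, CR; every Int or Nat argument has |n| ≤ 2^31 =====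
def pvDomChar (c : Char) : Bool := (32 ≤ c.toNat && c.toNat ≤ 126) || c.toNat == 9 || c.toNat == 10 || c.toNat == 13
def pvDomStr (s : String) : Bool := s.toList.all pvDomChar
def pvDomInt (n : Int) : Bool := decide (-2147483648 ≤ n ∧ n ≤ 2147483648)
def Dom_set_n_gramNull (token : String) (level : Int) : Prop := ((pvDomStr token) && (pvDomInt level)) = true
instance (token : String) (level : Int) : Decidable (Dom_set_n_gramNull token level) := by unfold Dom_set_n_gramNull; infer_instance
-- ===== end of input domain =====

-- ===== PORT A =====
-- while i<=level: if len(token)<i: count+=1; i+=1  ≡ fold over range(1, level+1)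
def set_n_gramNull (token : String) (level : Int) : Int :=
  (PySem.List.pyRange 1 (level + 1) 1).foldl
    (fun count i => if (PySem.Str.len token) < i then count + 1 else count) 0

-- ===== PORT B =====
-- B: closed form max(0, level - len(token))
def set_n_gramNull_alt (token : String) (level : Int) : Int :=
  max 0 (level - PySem.Str.len token)

-- ===== PRECONDITION & SPEC =====
def Spec_set_n_gramNull (token : String) (level : Int) (out : Int) : Prop := out = set_n_gramNull_alt token level
instance (token : String) (level : Int) (out : Int) : Decidable (Spec_set_n_gramNull token level out) := by unfold Spec_set_n_gramNull; infer_instance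

-- ===== CLAIM (what is proved, stated in full; the proofs are below) =====
def Claim_equal_set_n_gramNull : Prop := ∀ (token : String) (level : Int), Dom_set_n_gramNull token level → Spec_set_n_gramNull token level (set_n_gramNull token level)

-- ===== LEMMAS AND PROOFS =====

-- ===== VERDICT (by name: the statement is the Claim_ definition above) =====
lemma foldl_count_range (len : Int) (hlen : 0 ≤ len) (n : Nat) :
    ((List.range n).map (fun k : Nat => (1 : Int) + (k : Int))).foldl
      (fun count i => if len < i then count + 1 else count) 0
      = max 0 ((n : Int) - len) := by
  induction n with
  | zero => simp; omega
  | succ m ih =>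
    rw [List.range_succ, List.map_append, List.foldl_append, ih]
    simp only [List.map_cons, List.map_nil, List.foldl_cons, List.foldl_nil]
    split_ifs with h <;> push_cast <;> omega

theorem set_n_gramNull_spec : Claim_equal_set_n_gramNull := by
  intro token level _
  unfold Spec_set_n_gramNull set_n_gramNull set_n_gramNull_alt
  rw [PySem.List.pyRange_one]
  have h : (level + 1 - 1).toNat = level.toNat := by omega
  rw [h, foldl_count_range _ (by simp [PySem.Str.len])]
  simp [PySem.Str.len]
  omega
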